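-- pv_equiv track=rewrite | github.com/TechBeme/kickstarter | src/kickstarter_tools/supabase_sync.py | extract_social_media_info
-- ===== SOURCE A (Python) =====
-- from typing import Any, Dict, List
--
-- SOCIAL_NETWORKS = {
--     'instagram': ['instagram.com'],
--     'facebook': ['facebook.com'],
--     'twitter': ['twitter.com', 'x.com'],
--     'youtube': ['youtube.com'],
--     'tiktok': ['tiktok.com'],
--     'linkedin': ['linkedin.com'],
--     'patreon': ['patreon.com'],
--     'discord': ['discord.gg', 'discord.com'],
--     'twitch': ['twitch.tv'],
--     'bluesky': ['bsky.app'],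
-- }
--
-- def normalize_domain(domain: str) -> str:
--     """Normalize domain to lowercase and remove www prefix."""
--     domain = domain.lower().strip()
--     if domain.startswith('www.'):
--         domain = domain[4:]
--     return domain
--
-- def categorize_website(url: str, domain: str) -> str | None:
--     """Identify which social network a website belongs to."""
--     normalized = normalize_domain(domain)
--
--     for network, domains in SOCIAL_NETWORKS.items():
--         for net_domain in domains:
--             if normalized == net_domain or normalized.endswith('.' + net_domain):
--                 return network
--     return None
--
-- def extract_social_media_info(websites: List[Dict[str, str]]) -> Dict[str, Any]:
--     """
--     Extract social media presence from websites list.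
--
--     Returns dict with has_* flags for each social network.
--     """
--     social_info = {
--         'has_instagram': False,
--         'has_facebook': False,
--         'has_twitter': False,
--         'has_youtube': False,
--         'has_tiktok': False,
--         'has_linkedin': False,
--         'has_patreon': False,
--         'has_discord': False,
--         'has_twitch': False,
--         'has_bluesky': False,
--         'has_other_website': False,
--     }
--
--     for website in websites:
--         url = website.get('url', '').strip()
--         domain = website.get('domain', '').strip()
--
--         if not url:
--             continue
--
--         network = categorize_website(url, domain)
--
--         if network:
--             social_info[f'has_{network}'] = True
--         else:
--             # It's a website but not a known social network
--             social_info['has_other_website'] = True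
--
--     return social_info
-- ===== SOURCE B (Python) =====
-- DOMAIN_TO_NETWORK = {
--     'instagram.com': 'instagram',
--     'facebook.com': 'facebook',
--     'twitter.com': 'twitter',
--     'x.com': 'twitter',
--     'youtube.com': 'youtube',
--     'tiktok.com': 'tiktok',
--     'linkedin.com': 'linkedin',
--     'patreon.com': 'patreon',
--     'discord.gg': 'discord',
--     'discord.com': 'discord',
--     'twitch.tv': 'twitch',
--     'bsky.app': 'bluesky',
-- }
--
-- NETWORK_NAMES = ['instagram', 'facebook', 'twitter', 'youtube', 'tiktok',
--                  'linkedin', 'patreon', 'discord', 'twitch', 'bluesky',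
--                  'other_website']
--
-- def _lookup_network(domain):
--     d = domain.lower().strip()
--     if d.startswith('www.'):
--         d = d[4:]
--     if d in DOMAIN_TO_NETWORK:
--         return DOMAIN_TO_NETWORK[d]
--     for i in range(len(d)):
--         if d[i] == '.' and d[i + 1:] in DOMAIN_TO_NETWORK:
--             return DOMAIN_TO_NETWORK[d[i + 1:]]
--     return None
--
-- def extract_social_media_info(websites):
--     found = set()
--     for website in websites:
--         if not website.get('url', '').strip():
--             continue
--         network = _lookup_network(website.get('domain', '').strip())
--         found.add(network if network is not None else 'other_website')
--     return {'has_' + name: name in found for name in NETWORK_NAMES}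
-- ===== Notes on version B (the rewrite author's own statement) =====
-- stated objective: alternative
-- what changed: A scans the nested SOCIAL_NETWORKS dict per website testing equality/endswith against every known domain; B instead builds a flat reverse index domain->network, walks the normalized domain's dot-suffixes to find the network, and accumulates found networks in a set rendered into the flag dict once at the end.
import Mathlib
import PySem

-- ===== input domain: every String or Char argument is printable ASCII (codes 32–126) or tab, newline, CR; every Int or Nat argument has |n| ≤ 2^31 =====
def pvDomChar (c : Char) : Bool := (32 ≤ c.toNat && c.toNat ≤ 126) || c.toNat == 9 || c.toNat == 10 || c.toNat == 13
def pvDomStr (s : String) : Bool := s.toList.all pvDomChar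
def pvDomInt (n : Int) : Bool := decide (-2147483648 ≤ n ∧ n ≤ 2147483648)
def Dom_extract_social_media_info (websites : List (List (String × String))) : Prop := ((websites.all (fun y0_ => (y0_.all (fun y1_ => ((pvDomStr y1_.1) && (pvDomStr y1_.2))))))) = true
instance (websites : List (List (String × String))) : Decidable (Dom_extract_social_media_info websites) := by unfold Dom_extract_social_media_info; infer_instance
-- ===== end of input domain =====

-- B replaces A's nested network/domain scan by a flat reverse index over the domain's
-- dot-suffixes and collects the found networks in a set rendered once at the end (objective: alternative).

-- ===== PORT A =====
def pvSocialNetworks : List (String × List String) :=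
  [("instagram", ["instagram.com"]),
   ("facebook", ["facebook.com"]),
   ("twitter", ["twitter.com", "x.com"]),
   ("youtube", ["youtube.com"]),
   ("tiktok", ["tiktok.com"]),
   ("linkedin", ["linkedin.com"]),
   ("patreon", ["patreon.com"]),
   ("discord", ["discord.gg", "discord.com"]),
   ("twitch", ["twitch.tv"]),
   ("bluesky", ["bsky.app"])]

-- normalize_domain (strings handled as their character lists)
def pvNormalizeDomain (domain : List Char) : List Char :=
  let d := PySem.Chars.strip (PySem.Chars.lower domain)
  if PySem.Chars.startswith d "www.".toList then PySem.Chars.slice d (some 4) none else d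

-- inner 'for net_domain in domains' loop of categorize_website ('.' ++ net_domain built as a char list)
def pvMatchDomains (normalized : List Char) (network : String) : List String → Option String
  | [] => none
  | nd :: rest =>
      if normalized == nd.toList || PySem.Chars.endswith normalized ('.' :: nd.toList) then some network
      else pvMatchDomains normalized network rest

-- outer 'for network, domains in SOCIAL_NETWORKS.items()' loop
def pvCategorizeLoop (normalized : List Char) : List (String × List String) → Option String
  | [] => none
  | (network, domains) :: rest =>
      match pvMatchDomains normalized network domains with
      | some n => some n
      | none => pvCategorizeLoop normalized rest

def pvCategorizeWebsite (_url domain : List Char) : Option String :=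
  pvCategorizeLoop (pvNormalizeDomain domain) pvSocialNetworks

def pvInitInfo : PySem.Dict String Bool :=
  PySem.Dict.mk
    [("has_instagram", false), ("has_facebook", false), ("has_twitter", false),
     ("has_youtube", false), ("has_tiktok", false), ("has_linkedin", false),
     ("has_patreon", false), ("has_discord", false), ("has_twitch", false),
     ("has_bluesky", false), ("has_other_website", false)]

-- f'has_{network}' is string concatenation
def pvHasKey (network : String) : String := String.ofList ("has_".toList ++ network.toList)

def pvStepA (d : PySem.Dict String Bool) (w : List (String × String)) : PySem.Dict String Bool :=
  let url := PySem.Chars.strip ((PySem.Dict.mk w).getD "url" "").toList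
  let domain := PySem.Chars.strip ((PySem.Dict.mk w).getD "domain" "").toList
  if url == [] then d
  else
    match pvCategorizeWebsite url domain with
    | some network => d.insert (pvHasKey network) true
    | none => d.insert "has_other_website" true

def extract_social_media_info (websites : List (List (String × String))) : List (String × Bool) :=
  (websites.foldl pvStepA pvInitInfo).items

-- ===== PORT B =====
def pvNetIndex : List (List Char × String) :=
  [("instagram.com".toList, "instagram"), ("facebook.com".toList, "facebook"),
   ("twitter.com".toList, "twitter"), ("x.com".toList, "twitter"),
   ("youtube.com".toList, "youtube"), ("tiktok.com".toList, "tiktok"),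
   ("linkedin.com".toList, "linkedin"), ("patreon.com".toList, "patreon"),
   ("discord.gg".toList, "discord"), ("discord.com".toList, "discord"),
   ("twitch.tv".toList, "twitch"), ("bsky.app".toList, "bluesky")]

def pvNetworkNames : List String :=
  ["instagram", "facebook", "twitter", "youtube", "tiktok", "linkedin",
   "patreon", "discord", "twitch", "bluesky", "other_website"]

def pvLookup (c : List Char) : Option String :=
  (PySem.Dict.mk pvNetIndex).get? c

-- 'for i in range(len(d)): if d[i] == "." and d[i+1:] in DOMAIN_TO_NETWORK: …' over the tails of d
def pvSuffixScan : List Char → Option String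
  | [] => none
  | c :: rest =>
      if c == '.' then
        match pvLookup rest with
        | some n => some n
        | none => pvSuffixScan rest
      else pvSuffixScan rest

def pvLookupNetwork (domain : List Char) : Option String :=
  let d0 := PySem.Chars.strip (PySem.Chars.lower domain)
  let d := if PySem.Chars.startswith d0 "www.".toList then PySem.Chars.slice d0 (some 4) none else d0
  match pvLookup d with
  | some n => some n
  | none => pvSuffixScan d

def pvStepB (found : PySem.Set String) (w : List (String × String)) : PySem.Set String :=
  if PySem.Chars.strip ((PySem.Dict.mk w).getD "url" "").toList == [] then found
  else
    match pvLookupNetwork (PySem.Chars.strip ((PySem.Dict.mk w).getD "domain" "").toList) with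
    | some network => PySem.Set.add found network
    | none => PySem.Set.add found "other_website"

-- 'has_' + name (string concatenation, B side)
def pvFlagKey (name : String) : String := String.ofList ("has_".toList ++ name.toList)

def extract_social_media_info_alt (websites : List (List (String × String))) : List (String × Bool) :=
  let found := websites.foldl pvStepB PySem.Set.empty
  pvNetworkNames.map (fun name => (pvFlagKey name, PySem.Set.contains found name))

-- ===== PRECONDITION & SPEC =====
def Spec_extract_social_media_info (websites : List (List (String × String))) (out : List (String × Bool)) : Prop := out = extract_social_media_info_alt websites
instance (websites : List (List (String × String))) (out : List (String × Bool)) : Decidable (Spec_extract_social_media_info websites out) := by unfold Spec_extract_social_media_info; infer_instance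

-- ===== CLAIM (what is proved, stated in full; the proofs are below) =====
def Claim_equal_extract_social_media_info : Prop := ∀ (websites : List (List (String × String))), Dom_extract_social_media_info websites → Spec_extract_social_media_info websites (extract_social_media_info websites)

-- ===== LEMMAS AND PROOFS =====

-- the tails of s that start right after a '.'
def pvDotTails : List Char → List (List Char)
  | [] => []
  | c :: r => (if c = '.' then [r] else []) ++ pvDotTails r

theorem mem_pvDotTails (t : List Char) : ∀ s : List Char, t ∈ pvDotTails s ↔ ('.' :: t) <:+ s := by
  intro s
  induction s with
  | nil => simp [pvDotTails]
  | cons c r ih =>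
      by_cases hc : c = '.'
      · subst hc
        simp [pvDotTails, ih, List.suffix_cons_iff, List.cons.injEq]
      · have hne : ('.' : Char) ≠ c := fun h => hc h.symm
        simp [pvDotTails, hc, ih, List.suffix_cons_iff, List.cons.injEq, hne]

theorem pvDotTails_length {t s : List Char} (h : t ∈ pvDotTails s) : t.length < s.length := by
  have := (mem_pvDotTails t s).mp h
  have hle := this.length_le
  simpa using hle

theorem pvDotTails_suffix {t s : List Char} (h : t ∈ pvDotTails s) : t <:+ s := by
  have := (mem_pvDotTails t s).mp h
  exact (List.suffix_cons '.' t).trans this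

theorem pvDotTails_nest : ∀ (s x y : List Char), (x = s ∨ x ∈ pvDotTails s) → y ∈ pvDotTails s →
    y.length < x.length → y ∈ pvDotTails x := by
  intro s
  induction s with
  | nil => intro x y _ hy; simp [pvDotTails] at hy
  | cons c r ih =>
      intro x y hx hy hlen
      rcases hx with rfl | hx
      · exact hy
      · simp only [pvDotTails, List.mem_append] at hx hy
        rcases hx with hx | hx
        · -- x = r (only when c = '.')
          have hxr : x = r := by
            by_cases hc : c = '.' <;> simp [hc] at hx; exact hx
          subst hxr
          rcases hy with hy | hy
          · by_cases hc : c = '.' <;> simp [hc] at hy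
            subst hy; omega
          · exact hy
        · rcases hy with hy | hy
          · by_cases hc : c = '.' <;> simp [hc] at hy
            subst hy
            have := pvDotTails_length hx
            omega
          · exact ih x y (Or.inr hx) hy hlen

-- Bool condition of A's inner test
def pvMatchesB (normalized dl : List Char) : Bool :=
  normalized == dl || PySem.Chars.endswith normalized ('.' :: dl)

theorem pvMatchesB_iff (n dl : List Char) :
    pvMatchesB n dl = true ↔ (dl = n ∨ dl ∈ pvDotTails n) := by
  unfold pvMatchesB
  rw [Bool.or_eq_true, beq_iff_eq, PySem.Chars.endswith_iff, mem_pvDotTails]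
  constructor
  · rintro (h | h)
    · exact Or.inl h.symm
    · exact Or.inr h
  · rintro (h | h)
    · exact Or.inl h.symm
    · exact Or.inr h

theorem pvMatchDomains_eq (normalized : List Char) (network : String) (ds : List String) :
    pvMatchDomains normalized network ds
      = (ds.map fun d => (d.toList, network)).findSome?
          (fun q => if pvMatchesB normalized q.1 then some q.2 else none) := by
  induction ds with
  | nil => rfl
  | cons d rest ih =>
      simp only [pvMatchDomains, List.map_cons, List.findSome?_cons]
      rw [show (normalized == d.toList || PySem.Chars.endswith normalized ('.' :: d.toList))
            = pvMatchesB normalized d.toList from rfl]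
      cases h : pvMatchesB normalized d.toList
      · simp [ih]
      · simp

theorem pvCategorizeLoop_eq (normalized : List Char) (nets : List (String × List String)) :
    pvCategorizeLoop normalized nets
      = (nets.flatMap fun p => p.2.map fun d => (d.toList, p.1)).findSome?
          (fun q => if pvMatchesB normalized q.1 then some q.2 else none) := by
  induction nets with
  | nil => rfl
  | cons p rest ih =>
      obtain ⟨network, domains⟩ := p
      simp only [pvCategorizeLoop, List.flatMap_cons, List.findSome?_append,
        pvMatchDomains_eq, ih]
      cases (domains.map fun d => (d.toList, network)).findSome?
          (fun q => if pvMatchesB normalized q.1 then some q.2 else none) <;> simp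

theorem pvFlat_concrete :
    (pvSocialNetworks.flatMap fun p => p.2.map fun d => (d.toList, p.1)) = pvNetIndex := by
  decide

theorem pvSuffixScan_eq (s : List Char) :
    pvSuffixScan s = (pvDotTails s).findSome? pvLookup := by
  induction s with
  | nil => rfl
  | cons c r ih =>
      simp only [pvSuffixScan, pvDotTails]
      by_cases hc : c = '.'
      · subst hc
        simp only [beq_self_eq_true, if_true, List.cons_append, List.nil_append,
          List.findSome?_cons]
        cases pvLookup r <;> simp [ih]
      · have : (c == '.') = false := by simp [hc]
        simp [this, hc, ih]

theorem pvLookup_eq_some_iff (c : List Char) (n : String) :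
    pvLookup c = some n ↔ (c, n) ∈ pvNetIndex := by
  constructor
  · intro h
    simp only [pvLookup, PySem.Dict.get?] at h
    obtain ⟨p, hp, hp2⟩ := Option.map_eq_some_iff.mp h
    have hmem := List.mem_of_find?_eq_some hp
    have hkey := List.find?_some hp
    have : p.1 = c := by simpa using hkey
    have : p = (c, n) := by
      obtain ⟨p1, p2⟩ := p
      simp_all
    simpa [this] using hmem
  · intro h
    fin_cases h <;> decide

theorem pvLookup_val_mem {c : List Char} {n : String} (h : pvLookup c = some n) :
    n ∈ pvNetworkNames := by
  have := (pvLookup_eq_some_iff c n).mp h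
  fin_cases this <;> decide

-- findSome? over an association list with a unique admissible key
theorem findSome?_if_unique {α β : Type} [DecidableEq α] (p : α → Bool) (c : α) (n : β) :
    ∀ l : List (α × β), (c, n) ∈ l → (l.map Prod.fst).Nodup → p c = true →
    (∀ q ∈ l, p q.1 = true → q.1 = c) →
    l.findSome? (fun q => if p q.1 then some q.2 else none) = some n := by
  intro l
  induction l with
  | nil => intro h; simp at h
  | cons a t ih =>
      intro hmem hnd hpc huniq
      simp only [List.map_cons, List.nodup_cons] at hnd
      obtain ⟨hna, hndt⟩ := hnd
      simp only [List.findSome?_cons]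
      cases ha : p a.1
      · have hane : a.1 ≠ c := fun h => by rw [h, hpc] at ha; cases ha
        have hmem' : (c, n) ∈ t := by
          rcases List.mem_cons.mp hmem with h | h
          · exact absurd (congrArg Prod.fst h.symm) hane
          · exact h
        simpa using ih hmem' hndt hpc (fun q hq hpq => huniq q (List.mem_cons_of_mem _ hq) hpq)
      · have hac : a.1 = c := huniq a (by simp) ha
        have haeq : a = (c, n) := by
          rcases List.mem_cons.mp hmem with h | h
          · exact h.symm
          · exfalso
            have : a.1 ∈ List.map Prod.fst t := by
              rw [hac]; exact List.mem_map.mpr ⟨(c, n), h, rfl⟩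
            exact hna this
        subst haeq
        simp

theorem pvSuffix_eq_of_length {x y s : List Char} (hx : x <:+ s) (hy : y <:+ s)
    (h : x.length = y.length) : x = y := by
  obtain ⟨u, rfl⟩ := hx
  obtain ⟨v, hv⟩ := hy
  have hu : u.length = v.length := by
    have := congrArg List.length hv
    simp at this ⊢
    omega
  have := congrArg (List.drop u.length) hv
  simpa [List.drop_left, hu, List.drop_left'] using this.symm

theorem pvCand_unique {s x y : List Char}
    (hx : x = s ∨ x ∈ pvDotTails s) (hy : y = s ∨ y ∈ pvDotTails s)
    (hxk : x ∈ pvNetIndex.map Prod.fst) (hyk : y ∈ pvNetIndex.map Prod.fst) :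
    x = y := by
  have nonest : ∀ a ∈ pvNetIndex.map Prod.fst, ∀ b ∈ pvNetIndex.map Prod.fst,
      b ∈ pvDotTails a → False := by decide
  have hsx : x <:+ s := by
    rcases hx with rfl | hx
    · exact List.suffix_refl _
    · exact pvDotTails_suffix hx
  have hsy : y <:+ s := by
    rcases hy with rfl | hy
    · exact List.suffix_refl _
    · exact pvDotTails_suffix hy
  by_cases hlen : x.length = y.length
  · exact pvSuffix_eq_of_length hsx hsy hlen
  · exfalso
    rcases Nat.lt_or_ge x.length y.length with hlt | hge
    · -- x is strictly shorter: x ∈ pvDotTails s, so x ∈ pvDotTails y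
      have hxd : x ∈ pvDotTails s := by
        rcases hx with rfl | hx
        · have := hsy.length_le; omega
        · exact hx
      exact nonest y hyk x hxk (pvDotTails_nest s y x hy hxd hlt)
    · have hlt : y.length < x.length := by omega
      have hyd : y ∈ pvDotTails s := by
        rcases hy with rfl | hy
        · have := hsx.length_le; omega
        · exact hy
      exact nonest x hxk y hyk (pvDotTails_nest s x y hx hyd hlt)

theorem pvKeysNodup : (pvNetIndex.map Prod.fst).Nodup := by decide

theorem pvCat_eq (normalized : List Char) :
    pvCategorizeLoop normalized pvSocialNetworks
      = match pvLookup normalized with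
        | some n => some n
        | none => pvSuffixScan normalized := by
  rw [pvCategorizeLoop_eq, pvFlat_concrete]
  have hBform :
      (match pvLookup normalized with
        | some n => some n
        | none => pvSuffixScan normalized)
      = (normalized :: pvDotTails normalized).findSome? pvLookup := by
    rw [pvSuffixScan_eq, List.findSome?_cons]
    cases pvLookup normalized <;> rfl
  rw [hBform]
  rcases hB : (normalized :: pvDotTails normalized).findSome? pvLookup with _ | n
  · -- no candidate is a key: A's scan finds nothing either
    have hall := List.findSome?_eq_none_iff.mp hB
    apply List.findSome?_eq_none_iff.mpr
    intro q hq
    by_cases hm : pvMatchesB normalized q.1 = true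
    · exfalso
      have hcand : q.1 = normalized ∨ q.1 ∈ pvDotTails normalized := (pvMatchesB_iff _ _).mp hm
      have hqmem : q.1 ∈ (normalized :: pvDotTails normalized) := by
        rcases hcand with h | h
        · simp [h]
        · exact List.mem_cons_of_mem _ h
      have := hall _ hqmem
      have hsome : pvLookup q.1 = some q.2 := (pvLookup_eq_some_iff _ _).mpr (by simpa using hq)
      simp [hsome] at this
    · simp only [Bool.not_eq_true] at hm
      simp [hm]
  · obtain ⟨c, hcmem, hcl⟩ := List.exists_of_findSome?_eq_some hB
    have hcn : (c, n) ∈ pvNetIndex := (pvLookup_eq_some_iff _ _).mp hcl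
    have hcand : c = normalized ∨ c ∈ pvDotTails normalized := by
      rcases List.mem_cons.mp hcmem with h | h
      · exact Or.inl h
      · exact Or.inr h
    apply findSome?_if_unique (pvMatchesB normalized) c n pvNetIndex hcn pvKeysNodup
    · exact (pvMatchesB_iff _ _).mpr (by tauto)
    · intro q hq hpq
      have hqcand := (pvMatchesB_iff _ _).mp hpq
      have hqk : q.1 ∈ pvNetIndex.map Prod.fst := List.mem_map.mpr ⟨q, hq, rfl⟩
      have hck : c ∈ pvNetIndex.map Prod.fst := List.mem_map.mpr ⟨(c, n), hcn, rfl⟩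
      exact pvCand_unique (by tauto) (by tauto) hqk hck

theorem pvCat_full (url dom : List Char) : pvCategorizeWebsite url dom = pvLookupNetwork dom := by
  simp only [pvCategorizeWebsite, pvNormalizeDomain, pvLookupNetwork]
  exact pvCat_eq _

theorem pvSuffixScan_mem : ∀ (d : List Char) (n : String),
    pvSuffixScan d = some n → n ∈ pvNetworkNames := by
  intro d
  induction d with
  | nil => intro n h; exact absurd h (by simp [pvSuffixScan])
  | cons c r ih =>
      intro n h
      by_cases hc : (c == '.') = true
      · have h' : (match pvLookup r with
                   | some m => some m
                   | none => pvSuffixScan r) = some n := by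
          rw [pvSuffixScan, if_pos hc] at h; exact h
        rcases hr : pvLookup r with _ | m
        · rw [hr] at h'; exact ih n h'
        · rw [hr] at h'
          cases h'; exact pvLookup_val_mem hr
      · rw [pvSuffixScan, if_neg hc] at h
        exact ih n h

theorem pvCatB_mem (d : List Char) (n : String)
    (h : (match pvLookup d with | some m => some m | none => pvSuffixScan d) = some n) :
    n ∈ pvNetworkNames := by
  rcases hL : pvLookup d with _ | m
  · rw [hL] at h; exact pvSuffixScan_mem d n h
  · rw [hL] at h; cases h; exact pvLookup_val_mem hL

theorem pvLookupNetwork_mem {dom : List Char} {n : String}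
    (h : pvLookupNetwork dom = some n) : n ∈ pvNetworkNames := by
  simp only [pvLookupNetwork] at h
  exact pvCatB_mem _ _ h

-- rendering of the found-set as the (fixed) flag dict
def pvRender (found : PySem.Set String) : List (String × Bool) :=
  pvNetworkNames.map (fun name => (pvFlagKey name, PySem.Set.contains found name))

theorem insert_render (S : PySem.Set String) (name : String) (hmem : name ∈ pvNetworkNames) :
    (PySem.Dict.mk (pvRender S)).insert (pvHasKey name) true
      = PySem.Dict.mk (pvRender (PySem.Set.add S name)) := by
  rw [show pvHasKey name = pvFlagKey name from rfl]
  have h1 : pvFlagKey "instagram" = "has_instagram" := by decide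
  have h2 : pvFlagKey "facebook" = "has_facebook" := by decide
  have h3 : pvFlagKey "twitter" = "has_twitter" := by decide
  have h4 : pvFlagKey "youtube" = "has_youtube" := by decide
  have h5 : pvFlagKey "tiktok" = "has_tiktok" := by decide
  have h6 : pvFlagKey "linkedin" = "has_linkedin" := by decide
  have h7 : pvFlagKey "patreon" = "has_patreon" := by decide
  have h8 : pvFlagKey "discord" = "has_discord" := by decide
  have h9 : pvFlagKey "twitch" = "has_twitch" := by decide
  have h10 : pvFlagKey "bluesky" = "has_bluesky" := by decide
  have h11 : pvFlagKey "other_website" = "has_other_website" := by decide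
  fin_cases hmem <;>
    (apply PySem.Dict.ext;
     simp [h1, h2, h3, h4, h5, h6, h7, h8, h9, h10, h11, pvRender, pvNetworkNames,
       PySem.Dict.items_insert, PySem.Dict.contains_mk])

theorem step_render (S : PySem.Set String) (w : List (String × String)) :
    pvStepA (PySem.Dict.mk (pvRender S)) w = PySem.Dict.mk (pvRender (pvStepB S w)) := by
  simp only [pvStepA, pvStepB]
  by_cases hurl : (PySem.Chars.strip ((PySem.Dict.mk w).getD "url" "").toList == ([] : List Char)) = true
  · simp [hurl]
  · simp only [Bool.not_eq_true] at hurl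
    simp only [hurl, if_false, Bool.false_eq_true]
    rw [pvCat_full]
    rcases h : pvLookupNetwork (PySem.Chars.strip ((PySem.Dict.mk w).getD "domain" "").toList) with _ | n
    · simpa using insert_render S "other_website" (by decide)
    · simpa using insert_render S n (pvLookupNetwork_mem h)

theorem fold_render (websites : List (List (String × String))) :
    ∀ S : PySem.Set String,
      websites.foldl pvStepA (PySem.Dict.mk (pvRender S))
        = PySem.Dict.mk (pvRender (websites.foldl pvStepB S)) := by
  induction websites with
  | nil => intro S; rfl
  | cons w rest ih =>
      intro S
      simp only [List.foldl_cons, step_render]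
      exact ih (pvStepB S w)

theorem init_render : pvInitInfo = PySem.Dict.mk (pvRender PySem.Set.empty) := by decide

-- ===== VERDICT (by name: the statement is the Claim_ definition above) =====
theorem extract_social_media_info_spec : Claim_equal_extract_social_media_info := by
  intro websites _
  unfold Spec_extract_social_media_info extract_social_media_info extract_social_media_info_alt
  rw [init_render, fold_render]
  rfl
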